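-- pv_equiv track=rewrite | github.com/NguyenThuy2601/BTL_CNPM | PythonApp/LoadData.py | combine_ticket_income_stats
-- ===== SOURCE A (Python) =====
-- def convert_to_list_of_list(tuple):
--     for i in range(0, len(tuple)):
--         tuple[i] = list(tuple[i])
--     return tuple
--
-- def asign_to_temp(list):
--     temp = []
--     for i in range(0, len(list)):
--         temp.append(list[i])
--     return temp
--
-- def combine_ticket_income_stats(Fclass_stat, Sclass_stat):
--     total = asign_to_temp(convert_to_list_of_list(Fclass_stat))
--
--     for i in range(0, len(total)):
--         for j in range(0, len(Sclass_stat)):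
--             if (Sclass_stat[j][0] == total[i][0]):
--                 total[i][1] += Sclass_stat[j][1]
--                 total[i][2] += Sclass_stat[j][2]
--
--     flag = True
--     temp = []
--     for j in range(0, len(Sclass_stat)):
--         flag = True
--         index = 0
--         for i in range(0, len(total)):
--             if (Sclass_stat[j][0] != total[i][0]):
--                 flag = False
--                 index = j
--             else:
--                 flag = True
--                 break
--         if not flag:
--             temp.append(list(Sclass_stat[index]))
--
--     for i in range(0, len(temp)):
--         total.append(temp[i])
--
--     return total
-- ===== SOURCE B (Python) =====
-- def combine_ticket_income_stats(Fclass_stat, Sclass_stat):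
--     # Sum Sclass columns per key once, then one pass over Fclass and one over Sclass.
--     sums = {}
--     for k, a, b in Sclass_stat:
--         pa, pb = sums.get(k, (0, 0))
--         sums[k] = (pa + a, pb + b)
--     fkeys = {row[0] for row in Fclass_stat}
--     total = [[k, a + sums.get(k, (0, 0))[0], b + sums.get(k, (0, 0))[1]]
--              for k, a, b in Fclass_stat]
--     extras = [list(s) for s in Sclass_stat if s[0] not in fkeys]
--     return total + extras
-- ===== Notes on version B (the rewrite author's own statement) =====
-- stated objective: faster
-- what changed: Replaced A's nested O(n*m) scans (per-row scan of Sclass, per-Sclass-row flag/index scan of total) by a per-key sum dictionary and a key set built once, then single passes over each list.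
-- intended difference: When Fclass_stat is empty and Sclass_stat is not, A's flag stays True over the empty total so A returns [] and drops all Sclass rows; B returns the Sclass rows themselves, which is the intended merge of the two stat lists. — e.g. on combine_ticket_income_stats([], [(1, 2, 3)]): A returns [], B returns [[1, 2, 3]]
import Mathlib
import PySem

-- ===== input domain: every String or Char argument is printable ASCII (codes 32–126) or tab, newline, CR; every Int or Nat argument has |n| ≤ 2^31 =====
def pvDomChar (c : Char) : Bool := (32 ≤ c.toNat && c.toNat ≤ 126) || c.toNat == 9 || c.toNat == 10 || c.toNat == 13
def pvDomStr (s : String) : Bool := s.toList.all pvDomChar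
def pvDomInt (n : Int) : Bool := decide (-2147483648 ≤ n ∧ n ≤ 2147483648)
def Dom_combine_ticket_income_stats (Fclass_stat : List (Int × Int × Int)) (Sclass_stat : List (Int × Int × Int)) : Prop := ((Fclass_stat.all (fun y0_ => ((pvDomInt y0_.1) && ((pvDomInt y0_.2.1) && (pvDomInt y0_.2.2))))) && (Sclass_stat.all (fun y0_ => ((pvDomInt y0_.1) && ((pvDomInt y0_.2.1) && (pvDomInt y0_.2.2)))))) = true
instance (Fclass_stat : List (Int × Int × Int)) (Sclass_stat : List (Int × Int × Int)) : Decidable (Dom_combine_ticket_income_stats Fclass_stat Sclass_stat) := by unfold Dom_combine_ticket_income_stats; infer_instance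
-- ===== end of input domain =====

-- B replaces A's quadratic nested scans by a per-key sum dictionary and a key set (single passes).
-- Note: the Python A mutates Fclass_stat in place (tuples become lists); B does not — the claim is about the return value only.

-- ===== PORT A =====
-- list(tuple[i]) / list(Sclass_stat[index]): a (key, x, y) triple as the 3-element row [key, x, y]
def pvToRow (x : Int × Int × Int) : List Int := [x.1, x.2.1, x.2.2]

def pvConvertToListOfList (t : List (Int × Int × Int)) : List (List Int) :=
  t.map pvToRow

def pvAsignToTemp (l : List (List Int)) : List (List Int) :=
  l.foldl (fun temp r => temp ++ [r]) []

-- the inner j-loop of A's first nested loop, applied to one row total[i]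
-- (rows produced by pvConvertToListOfList always have exactly 3 elements; the wildcard arm is unreachable)
def pvAddMatches (S : List (Int × Int × Int)) (row : List Int) : List Int :=
  S.foldl (fun r s =>
    match r with
    | k :: a :: b :: rest => if s.1 == k then k :: (a + s.2.1) :: (b + s.2.2) :: rest else r
    | _ => r) row

-- the inner i-loop of A's second loop, with the flag/index state and the break
def pvScan (key : Int) (j : Nat) : List (List Int) → Bool → Nat → Bool × Nat
  | [], flag, index => (flag, index)
  | row :: rest, _flag, index =>
      if key != row.headD 0 then pvScan key j rest false j else (true, index)

-- the outer j-loop building temp; j is the running index into Sfull = Sclass_stat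
def pvTemp (Sfull : List (Int × Int × Int)) (total : List (List Int)) :
    Nat → List (Int × Int × Int) → List (List Int) → List (List Int)
  | _, [], temp => temp
  | j, s :: rest, temp =>
      let r := pvScan s.1 j total true 0
      if r.1 = false then
        match PySem.List.pyGet? Sfull (Int.ofNat r.2) with
        | some x => pvTemp Sfull total (j+1) rest (temp ++ [pvToRow x])
        | none => pvTemp Sfull total (j+1) rest temp
      else pvTemp Sfull total (j+1) rest temp

def combine_ticket_income_stats (Fclass_stat : List (Int × Int × Int)) (Sclass_stat : List (Int × Int × Int)) : List (List Int) :=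
  let total := pvAsignToTemp (pvConvertToListOfList Fclass_stat)
  let total := total.map (fun row => pvAddMatches Sclass_stat row)
  let temp := pvTemp Sclass_stat total 0 Sclass_stat []
  temp.foldl (fun t r => t ++ [r]) total

-- ===== PORT B =====
-- sums = {}; for k,a,b in Sclass_stat: sums[k] = sums.get(k,(0,0)) + (a,b)
def pvSums (S : List (Int × Int × Int)) : PySem.Dict Int (Int × Int) :=
  S.foldl (fun d s =>
    let p := d.getD s.1 (0, 0)
    d.insert s.1 (p.1 + s.2.1, p.2 + s.2.2)) PySem.Dict.empty

def combine_ticket_income_stats_alt (Fclass_stat : List (Int × Int × Int)) (Sclass_stat : List (Int × Int × Int)) : List (List Int) :=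
  let sums := pvSums Sclass_stat
  let fkeys := PySem.Set.ofList (Fclass_stat.map (fun r => r.1))
  let total := Fclass_stat.map (fun r =>
    [r.1, r.2.1 + (sums.getD r.1 (0, 0)).1, r.2.2 + (sums.getD r.1 (0, 0)).2])
  let extras := (Sclass_stat.filter (fun s => !(PySem.Set.contains fkeys s.1))).map (fun s => [s.1, s.2.1, s.2.2])
  total ++ extras

-- ===== PRECONDITION & SPEC =====
-- When Fclass_stat is empty, A's flag stays True over the empty total, so A drops every Sclass row and
-- returns []; B returns the Sclass rows themselves, which is the intended merge of the two stat lists.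
def D_combine_ticket_income_stats (Fclass_stat : List (Int × Int × Int)) (Sclass_stat : List (Int × Int × Int)) : Prop :=
  Fclass_stat = [] ∧ Sclass_stat ≠ []
instance (Fclass_stat : List (Int × Int × Int)) (Sclass_stat : List (Int × Int × Int)) : Decidable (D_combine_ticket_income_stats Fclass_stat Sclass_stat) := by unfold D_combine_ticket_income_stats; infer_instance

def Spec_combine_ticket_income_stats (Fclass_stat : List (Int × Int × Int)) (Sclass_stat : List (Int × Int × Int)) (out : List (List Int)) : Prop := ¬ D_combine_ticket_income_stats Fclass_stat Sclass_stat → out = combine_ticket_income_stats_alt Fclass_stat Sclass_stat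
instance (Fclass_stat : List (Int × Int × Int)) (Sclass_stat : List (Int × Int × Int)) (out : List (List Int)) : Decidable (Spec_combine_ticket_income_stats Fclass_stat Sclass_stat out) := by unfold Spec_combine_ticket_income_stats; infer_instance

def pvDiffWitness_combine_ticket_income_stats : (List (Int × Int × Int)) × (List (Int × Int × Int)) := ([], [(1, 2, 3)])
def pvDiffWitnessOut_combine_ticket_income_stats : (List (List Int)) × (List (List Int)) := ([], [[1, 2, 3]])

-- ===== CLAIM (what is proved, stated in full; the proofs are below) =====
def Claim_unchanged_combine_ticket_income_stats : Prop := ∀ (Fclass_stat : List (Int × Int × Int)) (Sclass_stat : List (Int × Int × Int)), Dom_combine_ticket_income_stats Fclass_stat Sclass_stat → Spec_combine_ticket_income_stats Fclass_stat Sclass_stat (combine_ticket_income_stats Fclass_stat Sclass_stat)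
def Claim_changed_combine_ticket_income_stats : Prop := Dom_combine_ticket_income_stats (pvDiffWitness_combine_ticket_income_stats.1) (pvDiffWitness_combine_ticket_income_stats.2) ∧ D_combine_ticket_income_stats (pvDiffWitness_combine_ticket_income_stats.1) (pvDiffWitness_combine_ticket_income_stats.2) ∧ combine_ticket_income_stats (pvDiffWitness_combine_ticket_income_stats.1) (pvDiffWitness_combine_ticket_income_stats.2) = pvDiffWitnessOut_combine_ticket_income_stats.1 ∧ combine_ticket_income_stats_alt (pvDiffWitness_combine_ticket_income_stats.1) (pvDiffWitness_combine_ticket_income_stats.2) = pvDiffWitnessOut_combine_ticket_income_stats.2 ∧ pvDiffWitnessOut_combine_ticket_income_stats.1 ≠ pvDiffWitnessOut_combine_ticket_income_stats.2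
def Claim_exact_combine_ticket_income_stats : Prop := ∀ (Fclass_stat : List (Int × Int × Int)) (Sclass_stat : List (Int × Int × Int)), Dom_combine_ticket_income_stats Fclass_stat Sclass_stat → D_combine_ticket_income_stats Fclass_stat Sclass_stat → combine_ticket_income_stats Fclass_stat Sclass_stat ≠ combine_ticket_income_stats_alt Fclass_stat Sclass_stat

-- ===== LEMMAS AND PROOFS =====

-- per-key column sums over S, as a fold (the mathematical content of both ports' accumulation)
def pvMS (key : Int) (S : List (Int × Int × Int)) : Int × Int :=
  S.foldl (fun p s => if s.1 = key then (p.1 + s.2.1, p.2 + s.2.2) else p) (0, 0)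

lemma pvMS_from (key : Int) (S : List (Int × Int × Int)) (p : Int × Int) :
    S.foldl (fun p s => if s.1 = key then (p.1 + s.2.1, p.2 + s.2.2) else p) p
      = (p.1 + (pvMS key S).1, p.2 + (pvMS key S).2) := by
  induction S generalizing p with
  | nil => simp [pvMS]
  | cons s rest ih =>
    simp only [pvMS, List.foldl_cons]
    rw [ih, ih]
    by_cases h : s.1 = key <;> simp [h, add_assoc]

lemma pvMS_cons (k : Int) (s : Int × Int × Int) (rest : List (Int × Int × Int)) :
    pvMS k (s :: rest)
      = if s.1 = k then (s.2.1 + (pvMS k rest).1, s.2.2 + (pvMS k rest).2) else pvMS k rest := by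
  simp only [pvMS, List.foldl_cons]
  by_cases h : s.1 = k
  · simp only [h, ite_true]
    rw [pvMS_from]
    simp [pvMS]
  · simp [h]

lemma addMatches_row (S : List (Int × Int × Int)) (k a b : Int) :
    pvAddMatches S [k, a, b] = [k, a + (pvMS k S).1, b + (pvMS k S).2] := by
  induction S generalizing a b with
  | nil => simp [pvAddMatches, pvMS]
  | cons s rest ih =>
    simp only [pvAddMatches, List.foldl_cons, beq_iff_eq] at *
    rw [pvMS_cons]
    by_cases h : s.1 = k
    · simp only [h, ite_true]
      rw [ih]
      simp [add_assoc]
    · simp only [h, ite_false]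
      rw [ih]

lemma sums_getD (S : List (Int × Int × Int)) :
    ∀ (d : PySem.Dict Int (Int × Int)) (k : Int),
      (S.foldl (fun d s =>
        let p := d.getD s.1 (0, 0)
        d.insert s.1 (p.1 + s.2.1, p.2 + s.2.2)) d).getD k (0, 0)
      = ((d.getD k (0, 0)).1 + (pvMS k S).1, (d.getD k (0, 0)).2 + (pvMS k S).2) := by
  induction S with
  | nil => intro d k; simp [pvMS]
  | cons s rest ih =>
    intro d k
    simp only [List.foldl_cons]
    rw [ih, PySem.Dict.getD_insert, pvMS_cons]
    by_cases h : k = s.1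
    · subst h
      simp [add_assoc]
    · have h' : ¬ s.1 = k := fun e => h e.symm
      simp [h, h']

lemma pvSums_getD (S : List (Int × Int × Int)) (k : Int) :
    (pvSums S).getD k (0, 0) = pvMS k S := by
  unfold pvSums
  rw [sums_getD]
  simp [PySem.Dict.empty, PySem.Dict.getD, PySem.Dict.get?]

lemma pvScan_fst (key : Int) (j : Nat) :
    ∀ (l : List (List Int)) (flag : Bool) (idx : Nat),
      (pvScan key j l flag idx).1 = (l.any (fun r => key == r.headD 0) || (l.isEmpty && flag)) := by
  have hx : ∀ (r : List Int), r.headD 0 = r.head?.getD 0 := fun r => by cases r <;> rfl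
  intro l
  induction l with
  | nil => intro flag idx; simp [pvScan]
  | cons row rest ih =>
    intro flag idx
    simp only [pvScan]
    by_cases h : (key != row.headD 0) = true
    · rw [if_pos h, ih]
      have hne : ¬ key = row.head?.getD 0 := by rw [← hx]; simpa using h
      simp [hne, hx]
    · rw [if_neg h]
      have he : key = row.head?.getD 0 := by rw [← hx]; simpa using h
      simp [he, hx]

lemma pvScan_snd (key : Int) (j : Nat) :
    ∀ (l : List (List Int)) (b : Bool), (pvScan key j l b j).2 = j := by
  intro l
  induction l with
  | nil => intro b; simp [pvScan]
  | cons row rest ih =>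
    intro b
    simp only [pvScan]
    by_cases h : (key != row.headD 0) = true
    · rw [if_pos h]; exact ih false
    · rw [if_neg h]

lemma pvScan_snd_of_false (key : Int) (j : Nat) (l : List (List Int)) (hl : l ≠ [])
    (hf : (pvScan key j l true 0).1 = false) : (pvScan key j l true 0).2 = j := by
  cases l with
  | nil => exact absurd rfl hl
  | cons row rest =>
    simp only [pvScan] at *
    by_cases h : (key != row.headD 0) = true
    · rw [if_pos h] at *; exact pvScan_snd key j rest false
    · rw [if_neg h] at hf; simp at hf

lemma pvTemp_nil_total (S : List (Int × Int × Int)) :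
    ∀ (j : Nat) (rest : List (Int × Int × Int)) (temp : List (List Int)),
      pvTemp S [] j rest temp = temp := by
  intro j rest
  induction rest generalizing j with
  | nil => intro temp; simp [pvTemp]
  | cons s r ih => intro temp; simp only [pvTemp, pvScan]; exact ih (j+1) temp

lemma pvTemp_spec (total : List (List Int)) (ht : total ≠ []) :
    ∀ (rest pre : List (Int × Int × Int)) (temp : List (List Int)),
      pvTemp (pre ++ rest) total pre.length rest temp
        = temp ++ (rest.filter (fun s => !(total.any (fun r => s.1 == r.headD 0)))).map pvToRow := by
  intro rest
  induction rest with
  | nil => intro pre temp; simp [pvTemp]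
  | cons s r ih =>
    intro pre temp
    simp only [pvTemp]
    have hfst := pvScan_fst s.1 pre.length total true 0
    have hemp : total.isEmpty = false := by cases total with
      | nil => exact absurd rfl ht
      | cons a b => rfl
    rw [hemp] at hfst
    simp only [Bool.false_and, Bool.or_false] at hfst
    by_cases hany : total.any (fun r => s.1 == r.headD 0) = true
    · -- flag true: no append
      rw [if_neg (by rw [hfst, hany]; simp)]
      have : pre ++ s :: r = (pre ++ [s]) ++ r := by simp
      rw [this]
      have hlen : pre.length + 1 = (pre ++ [s]).length := by simp
      rw [hlen, ih (pre ++ [s]) temp]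
      simp only [List.filter_cons, hany, Bool.not_true, Bool.false_eq_true, ite_false]
    · -- flag false: append S[j] = s
      have hf : (pvScan s.1 pre.length total true 0).1 = false := by
        rw [hfst]; simpa using hany
      rw [if_pos hf]
      rw [pvScan_snd_of_false s.1 pre.length total ht hf]
      have hget : PySem.List.pyGet? (pre ++ s :: r) (Int.ofNat pre.length) = some s := by
        show PySem.List.pyGet? (pre ++ s :: r) ((pre.length : Nat) : Int) = some s
        rw [PySem.List.pyGet?_natCast]
        rw [List.getElem?_append_right (le_refl pre.length)]
        simp
      rw [hget]
      show pvTemp (pre ++ s :: r) total (pre.length + 1) r (temp ++ [pvToRow s])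
          = temp ++ List.map pvToRow (List.filter (fun s => !(total.any fun r => s.1 == r.headD 0)) (s :: r))
      have h2 : pre ++ s :: r = (pre ++ [s]) ++ r := by simp
      rw [h2]
      have hlen : pre.length + 1 = (pre ++ [s]).length := by simp
      rw [hlen, ih (pre ++ [s]) (temp ++ [pvToRow s])]
      have hany' : (total.any (fun r => s.1 == r.headD 0)) = false := by
        simpa using hany
      have hfil : (s :: r).filter (fun s => !(total.any (fun r => s.1 == r.headD 0)))
          = s :: r.filter (fun s => !(total.any (fun r => s.1 == r.headD 0))) := by
        simp only [List.filter_cons, hany', Bool.not_false, ite_true]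
      rw [hfil]
      simp

lemma contains_fkeys (F : List (Int × Int × Int)) (x : Int) :
    PySem.Set.contains (PySem.Set.ofList (F.map (fun r => r.1))) x
      = F.any (fun r => x == r.1) := by
  by_cases h : x ∈ F.map (fun r => r.1)
  · have h1 : PySem.Set.contains (PySem.Set.ofList (F.map (fun r => r.1))) x = true := by
      rw [PySem.Set.contains_iff, PySem.Set.mem_ofList]; exact h
    rw [h1]
    simp only [List.mem_map] at h
    obtain ⟨r, hr, hx⟩ := h
    symm
    rw [List.any_eq_true]
    exact ⟨r, hr, by rw [hx]; simp⟩

  · have h1 : PySem.Set.contains (PySem.Set.ofList (F.map (fun r => r.1))) x = false := by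
      rw [Bool.eq_false_iff]
      intro hc
      rw [PySem.Set.contains_iff, PySem.Set.mem_ofList] at hc
      exact h hc
    rw [h1]
    symm
    rw [Bool.eq_false_iff]
    intro hc
    rw [List.any_eq_true] at hc
    obtain ⟨r, hr, hx⟩ := hc
    exact h (List.mem_map.mpr ⟨r, hr, by simpa using (beq_iff_eq.mp hx).symm⟩)

lemma total_eq (F S : List (Int × Int × Int)) :
    (pvAsignToTemp (pvConvertToListOfList F)).map (fun row => pvAddMatches S row)
      = F.map (fun r =>
          [r.1, r.2.1 + ((pvSums S).getD r.1 (0, 0)).1, r.2.2 + ((pvSums S).getD r.1 (0, 0)).2]) := by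
  unfold pvAsignToTemp pvConvertToListOfList
  rw [PySem.List.foldl_append_singleton_eq_self]
  simp only [List.nil_append, List.map_map]
  apply List.map_congr_left
  intro r _
  simp only [Function.comp, pvToRow]
  rw [addMatches_row, pvSums_getD]

-- ===== VERDICT (by name: the statement is the Claim_ definition above) =====
theorem combine_ticket_income_stats_spec : Claim_unchanged_combine_ticket_income_stats := by
  intro F S _ hD
  unfold D_combine_ticket_income_stats at hD
  push_neg at hD
  simp only [combine_ticket_income_stats, combine_ticket_income_stats_alt]
  rw [total_eq F S]
  rw [PySem.List.foldl_append_singleton_eq_self]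
  congr 1
  by_cases hF : F = []
  · -- then S = [] by ¬D_
    have hS := hD hF
    subst hF hS
    simp [pvTemp]
  · have ht : F.map (fun r =>
        [r.1, r.2.1 + ((pvSums S).getD r.1 (0, 0)).1, r.2.2 + ((pvSums S).getD r.1 (0, 0)).2]) ≠ [] := by
      simpa using hF
    have := pvTemp_spec _ ht S [] []
    simp only [List.nil_append, List.length_nil] at this
    rw [this]
    have hp : ∀ s ∈ S,
        (!((F.map (fun r => [r.1, r.2.1 + ((pvSums S).getD r.1 (0, 0)).1,
              r.2.2 + ((pvSums S).getD r.1 (0, 0)).2])).any (fun r => s.1 == r.headD 0)))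
          = (!(PySem.Set.ofList (F.map (fun r => r.1))).contains s.1) := by
      intro s _
      congr 1
      rw [contains_fkeys, List.any_map]
      congr 1
    rw [List.filter_congr hp]
    apply List.map_congr_left
    intro s _
    rfl

theorem combine_ticket_income_stats_changed : Claim_changed_combine_ticket_income_stats := by
  unfold Claim_changed_combine_ticket_income_stats; decide

theorem combine_ticket_income_stats_tight : Claim_exact_combine_ticket_income_stats := by
  intro F S _ hD
  obtain ⟨hF, hS⟩ := hD
  subst hF
  simp only [combine_ticket_income_stats, combine_ticket_income_stats_alt]
  simp only [pvAsignToTemp, pvConvertToListOfList, List.map_nil, List.foldl_nil]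
  rw [pvTemp_nil_total]
  simp only [List.foldl_nil, List.map_nil, List.nil_append]
  intro h
  apply hS
  cases S with
  | nil => rfl
  | cons s r =>
    exfalso
    have hc : PySem.Set.contains (PySem.Set.ofList ([] : List Int)) s.1 = false := rfl
    simp [List.filter_cons, hc] at h
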